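-- pv_equiv track=rewrite | github.com/Hexcaton/pie-233 | HW/hw8/2 practice.py | KthAppearance
-- ===== SOURCE A (Python) =====
-- def KthAppearance(A, a, k):
--     count = 0
--     for i in range(len(A)):
--         if A[i] == a:
--             count += 1
--             if count == k:
--                 return i + 1
--     return -1
-- ===== SOURCE B (Python) =====
-- def KthAppearance(A, a, k):
--     matches = [i for i, x in enumerate(A) if x == a]
--     if 1 <= k <= len(matches):
--         return matches[k - 1] + 1
--     return -1
-- ===== Notes on version B (the rewrite author's own statement) =====
-- stated objective: alternative
-- what changed: Replaced the running-counter early-exit index scan with a materialized list of all match positions built by a comprehension, followed by a guarded direct lookup of the k-th entry.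
import Mathlib
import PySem

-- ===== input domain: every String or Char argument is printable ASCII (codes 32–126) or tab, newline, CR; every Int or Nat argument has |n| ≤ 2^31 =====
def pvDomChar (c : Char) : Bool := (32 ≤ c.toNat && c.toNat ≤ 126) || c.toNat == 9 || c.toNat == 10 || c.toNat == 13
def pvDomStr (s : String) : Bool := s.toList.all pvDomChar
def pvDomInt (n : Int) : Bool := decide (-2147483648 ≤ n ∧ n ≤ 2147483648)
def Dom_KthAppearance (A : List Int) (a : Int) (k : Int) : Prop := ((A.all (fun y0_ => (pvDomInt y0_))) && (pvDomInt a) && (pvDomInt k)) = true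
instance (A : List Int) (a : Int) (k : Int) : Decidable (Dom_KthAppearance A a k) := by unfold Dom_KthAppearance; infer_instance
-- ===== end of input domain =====

-- B replaces A's running-counter early-exit scan with a materialized list of all match
-- positions and a guarded direct lookup of the k-th entry (alternative decomposition).


-- ===== PORT A =====
-- the for-loop over range(len(A)): remaining elements, current index i, current count
def KthAppearanceGo (a k : Int) : List Int → Int → Int → Int
  | [], _, _ => -1
  | x :: xs, i, count =>
    if x = a then
      if count + 1 = k then i + 1
      else KthAppearanceGo a k xs (i + 1) (count + 1)
    else KthAppearanceGo a k xs (i + 1) count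

def KthAppearance (A : List Int) (a : Int) (k : Int) : Int :=
  KthAppearanceGo a k A 0 0

-- ===== PORT B =====
def KthAppearance_alt (A : List Int) (a : Int) (k : Int) : Int :=
  let ms := (PySem.List.enumerate A).filterMap (fun p => if p.2 = a then some p.1 else none)
  if 1 ≤ k ∧ k ≤ (ms.length : Int) then
    ((PySem.List.pyGet? ms (k - 1)).getD (-1)) + 1
  else -1

-- ===== PRECONDITION & SPEC =====
def Spec_KthAppearance (A : List Int) (a : Int) (k : Int) (out : Int) : Prop := out = KthAppearance_alt A a k
instance (A : List Int) (a : Int) (k : Int) (out : Int) : Decidable (Spec_KthAppearance A a k out) := by unfold Spec_KthAppearance; infer_instance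

-- ===== CLAIM (what is proved, stated in full; the proofs are below) =====
def Claim_equal_KthAppearance : Prop := ∀ (A : List Int) (a : Int) (k : Int), Dom_KthAppearance A a k → Spec_KthAppearance A a k (KthAppearance A a k)

-- ===== LEMMAS AND PROOFS =====

-- the match-position list of a suffix, with enumeration starting at s
def pvMt (a : Int) (xs : List Int) (s : Int) : List Int :=
  (PySem.List.enumerate xs s).filterMap (fun p => if p.2 = a then some p.1 else none)

lemma pvMt_nil (a s : Int) : pvMt a [] s = [] := by
  simp [pvMt, PySem.List.enumerate_nil]

lemma pvMt_cons (a x : Int) (xs : List Int) (s : Int) :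
    pvMt a (x :: xs) s =
      (if x = a then [s] else []) ++ pvMt a xs (s + 1) := by
  simp only [pvMt, PySem.List.enumerate_cons, List.filterMap_cons]
  split_ifs with hx <;> simp

-- once count ≥ k the loop can never hit count = k again
lemma go_stop (a k : Int) : ∀ (xs : List Int) (i count : Int), k ≤ count →
    KthAppearanceGo a k xs i count = -1 := by
  intro xs
  induction xs with
  | nil => intro i count _; rfl
  | cons x xs ih =>
    intro i count h
    simp only [KthAppearanceGo]
    split_ifs with hx hk
    · omega
    · exact ih _ _ (by omega)
    · exact ih _ _ h

-- the loop returns the (k-count)-th remaining match position (1-based) plus one, or -1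
lemma go_eq (a k : Int) : ∀ (xs : List Int) (i count : Int), count < k →
    KthAppearanceGo a k xs i count =
      (match PySem.List.pyGet? (pvMt a xs i) (k - count - 1) with
       | some v => v + 1
       | none => -1) := by
  intro xs
  induction xs with
  | nil =>
    intro i count h
    have hn : PySem.List.pyGet? (pvMt a [] i) (k - count - 1) = none := by
      rw [PySem.List.pyGet?_eq_none_iff]
      unfold PySem.Raise.InRange
      simp [pvMt_nil]
    rw [hn]
    rfl
  | cons x xs ih =>
    intro i count h
    rw [pvMt_cons]
    simp only [KthAppearanceGo]
    split_ifs with hx hk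
    · -- x = a and count + 1 = k : index k-count-1 = 0 hits the head
      have : k - count - 1 = 0 := by omega
      rw [this]
      simp
    · -- x = a, count + 1 ≠ k : skip the head
      rw [ih _ _ (by omega)]
      have hn : k - count - 2 = ((k - count - 2).toNat : Int) := by omega
      have : k - count - 1 = ((k - count - 2).toNat : Int) + 1 := by omega
      rw [this]
      simp only [List.singleton_append, PySem.List.pyGet?_cons_succ]
      rw [← hn]
      have h2 : k - (count + 1) - 1 = k - count - 2 := by ring
      rw [h2]
    · -- x ≠ a : same match list, same count
      rw [ih _ _ h]
      simp

-- ===== VERDICT (by name: the statement is the Claim_ definition above) =====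
theorem KthAppearance_spec : Claim_equal_KthAppearance := by
  intro A a k _
  unfold Spec_KthAppearance KthAppearance KthAppearance_alt
  show KthAppearanceGo a k A 0 0 =
    (if 1 ≤ k ∧ k ≤ (((pvMt a A 0).length : Int)) then
      ((PySem.List.pyGet? (pvMt a A 0) (k - 1)).getD (-1)) + 1
    else -1)
  by_cases hk : 0 < k
  · rw [go_eq a k A 0 0 hk]
    by_cases hle : k ≤ ((pvMt a A 0).length : Int)
    · have h1 : PySem.Raise.InRange (pvMt a A 0).length (k - 1) := by
        unfold PySem.Raise.InRange; omega
      have h0 : k - 0 - 1 = k - 1 := by ring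
      rw [h0]
      cases hget : PySem.List.pyGet? (pvMt a A 0) (k - 1) with
      | none =>
        rw [PySem.List.pyGet?_eq_none_iff] at hget
        exact absurd h1 hget
      | some v =>
        rw [if_pos ⟨by omega, hle⟩]
        rfl
    · have : PySem.List.pyGet? (pvMt a A 0) (k - 0 - 1) = none := by
        rw [PySem.List.pyGet?_eq_none_iff]
        unfold PySem.Raise.InRange; omega
      rw [this, if_neg (by intro hc; omega)]
  · rw [go_stop a k A 0 0 (by omega)]
    have : ¬ (1 ≤ k ∧ k ≤ (((pvMt a A 0).length : Int))) := by
      intro ⟨h1, _⟩; omega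
    rw [if_neg this]
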